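-- pv_equiv track=rewrite | github.com/AntSos/practice | pi_blocks.py | height_pyramid
-- ===== SOURCE A (Python) =====
-- def height_pyramid (blocks):
--     count = 0
--     height = 0
--     layers = []
--
--     while count < blocks:
--         count += 1
--         layer = count
--         layers.append(layer)
--
--         if sum (layers) == blocks:
--             height = layer
--             break
--         elif sum (layers) <= blocks:
--             height = layer
--
--     return height
-- ===== SOURCE B (Python) =====
-- def height_pyramid(blocks):
--     if blocks <= 0:
--         return 0
--     lo, hi = 0, blocks + 1
--     while hi - lo > 1:
--         mid = (lo + hi) // 2
--         if mid * (mid + 1) // 2 <= blocks: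
--             lo = mid
--         else:
--             hi = mid
--     return lo
-- ===== Notes on version B (the rewrite author's own statement) =====
-- stated objective: faster
-- what changed: Replaced the linear layer-by-layer loop that re-sums the whole layer list every iteration with a binary search for the largest height whose triangular number does not exceed blocks.
import Mathlib
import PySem

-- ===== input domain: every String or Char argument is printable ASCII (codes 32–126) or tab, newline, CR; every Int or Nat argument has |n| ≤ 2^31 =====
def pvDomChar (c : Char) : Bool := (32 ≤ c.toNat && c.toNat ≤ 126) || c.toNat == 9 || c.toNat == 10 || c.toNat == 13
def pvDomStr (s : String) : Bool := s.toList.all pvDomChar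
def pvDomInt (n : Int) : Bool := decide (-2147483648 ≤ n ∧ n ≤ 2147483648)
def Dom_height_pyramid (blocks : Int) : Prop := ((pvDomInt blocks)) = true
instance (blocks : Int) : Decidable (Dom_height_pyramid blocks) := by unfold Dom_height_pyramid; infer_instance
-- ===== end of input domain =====

-- B replaces A's linear layer-accumulating loop with a binary search for the
-- largest h with h*(h+1)/2 ≤ blocks (objective: faster).


-- ===== PORT A =====
-- the while-loop of A; state (count, height, layers); terminates because blocks - count shrinks
def hpLoopA (blocks count height : Int) (layers : List Int) : Int :=
  if _h : count < blocks then
    let count' := count + 1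
    let layer := count'
    let layers' := layers ++ [layer]
    if layers'.sum = blocks then layer
    else if layers'.sum ≤ blocks then hpLoopA blocks count' layer layers'
    else hpLoopA blocks count' height layers'
  else height
termination_by (blocks - count).toNat
decreasing_by all_goals omega

def height_pyramid (blocks : Int) : Int :=
  hpLoopA blocks 0 0 []

-- ===== PORT B =====
-- binary search: state (lo, hi); terminates because hi - lo shrinks
def hpLoopB (blocks lo hi : Int) : Int :=
  if _h : hi - lo > 1 then
    let mid := PySem.Int.floordiv (lo + hi) 2
    if PySem.Int.floordiv (mid * (mid + 1)) 2 ≤ blocks then hpLoopB blocks mid hi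
    else hpLoopB blocks lo mid
  else lo
termination_by (hi - lo).toNat
decreasing_by
  · have h1 := (PySem.Int.le_floordiv_iff_mul_le (a := lo + hi) (b := 2) (q := lo + 1) (by norm_num)).mpr (by omega)
    omega
  · have h2 := (PySem.Int.floordiv_lt_iff_lt_mul (a := lo + hi) (b := 2) (q := hi) (by norm_num)).mpr (by omega)
    omega

def height_pyramid_alt (blocks : Int) : Int :=
  if blocks ≤ 0 then 0 else hpLoopB blocks 0 (blocks + 1)

-- ===== PRECONDITION & SPEC =====
def Spec_height_pyramid (blocks : Int) (out : Int) : Prop := out = height_pyramid_alt blocks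
instance (blocks : Int) (out : Int) : Decidable (Spec_height_pyramid blocks out) := by unfold Spec_height_pyramid; infer_instance

-- ===== CLAIM (what is proved, stated in full; the proofs are below) =====
def Claim_equal_height_pyramid : Prop := ∀ (blocks : Int), Dom_height_pyramid blocks → Spec_height_pyramid blocks (height_pyramid blocks)

-- ===== LEMMAS AND PROOFS =====

-- characterisation: h is the answer, i.e. h*(h+1) ≤ 2b < (h+1)*(h+2)
def hpChar (b h : Int) : Prop := 0 ≤ h ∧ h * (h + 1) ≤ 2 * b ∧ 2 * b < (h + 1) * (h + 2)

theorem hpChar_unique {b h1 h2 : Int} (c1 : hpChar b h1) (c2 : hpChar b h2) : h1 = h2 := by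
  obtain ⟨p1, l1, r1⟩ := c1
  obtain ⟨p2, l2, r2⟩ := c2
  by_contra hne
  rcases lt_or_gt_of_ne hne with h | h
  · have : (h1 + 1) * (h1 + 2) ≤ h2 * (h2 + 1) := by nlinarith
    omega
  · have : (h2 + 1) * (h2 + 2) ≤ h1 * (h1 + 1) := by nlinarith
    omega

-- A's loop returns a value satisfying hpChar, under the stated invariant
theorem hpLoopA_char (blocks : Int) (hb : 1 ≤ blocks) :
    ∀ (n : Nat), ∀ count height layers, (blocks - count).toNat ≤ n →
    0 ≤ count → count ≤ blocks →
    2 * layers.sum = count * (count + 1) →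
    (count * (count + 1) ≤ 2 * blocks → height = count) →
    (2 * blocks < count * (count + 1) → hpChar blocks height ∧ height < count) →
    hpChar blocks (hpLoopA blocks count height layers) := by
  intro n
  induction n with
  | zero =>
    intro count height layers hn hc0 hcb hsum hinv1 hinv2
    have hcb' : count = blocks := by omega
    rw [hpLoopA, dif_neg (by omega)]
    by_cases hcase : count * (count + 1) ≤ 2 * blocks
    · have hhc : height = count := hinv1 hcase
      have h2c : 2 * count ≤ count * (count + 1) := by nlinarith
      have heq : count * (count + 1) = 2 * blocks := by omega
      exact hhc ▸ ⟨by omega, by omega, by nlinarith⟩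
    · exact (hinv2 (by omega)).1
  | succ n ih =>
    intro count height layers hn hc0 hcb hsum hinv1 hinv2
    by_cases hlt : count < blocks
    · rw [hpLoopA]
      simp only [dif_pos hlt, List.sum_append, List.sum_cons, List.sum_nil]
      have hsum' : 2 * (layers.sum + (count + 1 + 0)) = (count + 1) * (count + 1 + 1) := by
        linear_combination hsum
      by_cases h1 : layers.sum + (count + 1 + 0) = blocks
      · rw [if_pos h1]
        have h2b : 2 * blocks = (count + 1) * (count + 1 + 1) := by omega
        refine ⟨by omega, by omega, ?_⟩
        nlinarith [h2b, hc0]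
      · rw [if_neg h1]
        have hsumApp : 2 * (layers ++ [count + 1]).sum = (count + 1) * (count + 1 + 1) := by
          simp only [List.sum_append, List.sum_cons, List.sum_nil]
          linear_combination hsum
        by_cases h2 : layers.sum + (count + 1 + 0) ≤ blocks
        · rw [if_pos h2]
          have hle2 : (count + 1) * (count + 1 + 1) ≤ 2 * blocks := by omega
          refine ih (count + 1) (count + 1) (layers ++ [count + 1]) (by omega) (by omega)
            (by omega) hsumApp (fun _ => rfl) (fun hgt => absurd hle2 (by omega))
        · rw [if_neg h2]
          have hgt' : 2 * blocks < (count + 1) * (count + 1 + 1) := by omega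
          refine ih (count + 1) height (layers ++ [count + 1]) (by omega) (by omega)
            (by omega) hsumApp (fun hle' => absurd hgt' (by omega)) ?_
          intro _
          by_cases hcase : count * (count + 1) ≤ 2 * blocks
          · have hhc : height = count := hinv1 hcase
            have hmid : 2 * blocks < (height + 1) * (height + 2) := by
              rw [hhc]
              calc 2 * blocks < (count + 1) * (count + 1 + 1) := hgt'
                _ = (count + 1) * (count + 2) := by ring
            exact ⟨⟨by omega, by nlinarith [hcase, hhc], hmid⟩, by omega⟩
          · obtain ⟨hc, hlt'⟩ := hinv2 (by omega)
            exact ⟨hc, by omega⟩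
    · rw [hpLoopA, dif_neg hlt]
      have hcb' : count = blocks := by omega
      by_cases hcase : count * (count + 1) ≤ 2 * blocks
      · have hhc : height = count := hinv1 hcase
        have h2c : 2 * count ≤ count * (count + 1) := by nlinarith
        have heq : count * (count + 1) = 2 * blocks := by omega
        exact hhc ▸ ⟨by omega, by omega, by nlinarith⟩
      · exact (hinv2 (by omega)).1

-- B's loop returns r whenever hpChar holds of r and the bracketing invariant holds
theorem hpLoopB_char (blocks r : Int) (hr : hpChar blocks r) :
    ∀ (n : Nat), ∀ lo hi, (hi - lo).toNat ≤ n → 0 ≤ lo → lo < hi →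
    lo * (lo + 1) ≤ 2 * blocks → 2 * blocks < hi * (hi + 1) →
    hpLoopB blocks lo hi = r := by
  intro n
  induction n with
  | zero =>
    intro lo hi hn hlo0 hlt hlosum hhisum
    omega
  | succ n ih =>
    intro lo hi hn hlo0 hlt hlosum hhisum
    by_cases hgt : hi - lo > 1
    · rw [hpLoopB]
      simp only [dif_pos hgt]
      have hmb := PySem.Int.floordiv_two_mid_bounds (lo := lo) (hi := hi) (by omega)
      set mid := PySem.Int.floordiv (lo + hi) 2 with hmiddef
      have hmidlo : lo < mid := by
        have := (PySem.Int.le_floordiv_iff_mul_le (a := lo + hi) (b := 2) (q := lo + 1) (by norm_num)).mpr (by omega)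
        omega
      have hmidhi : mid < hi := by
        have := (PySem.Int.floordiv_lt_iff_lt_mul (a := lo + hi) (b := 2) (q := hi) (by norm_num)).mpr (by omega)
        omega
      obtain ⟨k, hk⟩ := Int.even_mul_succ_self mid
      by_cases hc : PySem.Int.floordiv (mid * (mid + 1)) 2 ≤ blocks
      · rw [if_pos hc]
        have hlow : mid * (mid + 1) ≤ 2 * blocks := by
          have := (PySem.Int.floordiv_lt_iff_lt_mul (a := mid * (mid + 1)) (b := 2) (q := blocks + 1) (by norm_num)).mp (by omega)
          omega
        exact ih mid hi (by omega) (by omega) hmidhi hlow hhisum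
      · rw [if_neg hc]
        have hhigh : 2 * blocks < mid * (mid + 1) := by
          have := (PySem.Int.le_floordiv_iff_mul_le (a := mid * (mid + 1)) (b := 2) (q := blocks + 1) (by norm_num)).mp (by omega)
          omega
        exact ih lo mid (by omega) hlo0 hmidlo hlosum hhigh
    · rw [hpLoopB]
      simp only [dif_neg hgt]
      have hhi : hi = lo + 1 := by omega
      subst hhi
      exact hpChar_unique ⟨hlo0, hlosum, by linarith [hhisum]⟩ hr

theorem hpB_char (blocks : Int) (hb : 1 ≤ blocks) (r : Int) (hr : hpChar blocks r) :
    height_pyramid_alt blocks = r := by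
  unfold height_pyramid_alt
  rw [if_neg (by omega)]
  apply hpLoopB_char blocks r hr (blocks + 1).toNat 0 (blocks + 1) (by omega) le_rfl (by omega) (by omega)
  nlinarith

-- ===== VERDICT (by name: the statement is the Claim_ definition above) =====
theorem height_pyramid_spec : Claim_equal_height_pyramid := by
  intro blocks _
  unfold Spec_height_pyramid
  by_cases hb : blocks ≤ 0
  · unfold height_pyramid height_pyramid_alt
    rw [hpLoopA, dif_neg (by omega : ¬ (0:Int) < blocks), if_pos hb]
  · have hb1 : 1 ≤ blocks := by omega
    have hA : hpChar blocks (height_pyramid blocks) := by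
      unfold height_pyramid
      apply hpLoopA_char blocks hb1 blocks.toNat 0 0 [] (by omega) le_rfl (by omega) (by norm_num)
      · intro _; rfl
      · intro h; norm_num at h; omega
    exact (hpB_char blocks hb1 _ hA).symm
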